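-- pv_equiv track=rewrite | github.com/Midriaz/codility | nickel2018/main.py | solution
-- ===== SOURCE A (Python) =====
-- def solution(p: list) -> int:
--     # the first step: calculate the number of elements in the triangle
--     total_square = sum([len(p)-i for i in range(0, len(p)+1)])
--
--     # the next step: find the lengths of all sequences of False elements
--     blank = False  # indicates if a current sequence is of False elements
--     seq = 0  # a length of a sequence of False elements
--     zeros = []  # store the lengths of the sequences
--     for i in range(len(p)):
--         if not p[i]:
--             if blank:
--                 seq += 1
--             else:
--                 # the first element of a sequence of False elements
--                 blank = True
--                 seq = 1
--         else:
--             blank = False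
--             zeros.append(seq)
--             seq = 0
--     # don't forget to save the length of the last sequence
--     zeros.append(seq)
--
--     # the final step: subtract the number of elements in "ZERO Triangles"
--     for x in zeros:
--         total_square -= sum([x-i for i in range(0, x)])
--
--     # checking the constraints set in the task
--     if total_square >= 1000000000:
--         return 1000000000
--     return total_square
-- ===== SOURCE B (Python) =====
-- def solution(p: list) -> int:
--     # closed-form total minus closed-form zero-run triangles, one pass, no intermediate list
--     n = len(p)
--     total = n * (n + 1) // 2
--     run = 0
--     for x in p:
--         if x:
--             total -= run * (run + 1) // 2
--             run = 0
--         else: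
--             run += 1
--     total -= run * (run + 1) // 2
--     return 1000000000 if total >= 1000000000 else total
-- ===== Notes on version B (the rewrite author's own statement) =====
-- stated objective: simpler
-- what changed: Replaces A's per-cell range-sums and blank/seq/zeros state machine plus second re-scan loop with the closed form n*(n+1)//2 and a single pass that subtracts run*(run+1)//2 at the end of each False run.
import Mathlib
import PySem

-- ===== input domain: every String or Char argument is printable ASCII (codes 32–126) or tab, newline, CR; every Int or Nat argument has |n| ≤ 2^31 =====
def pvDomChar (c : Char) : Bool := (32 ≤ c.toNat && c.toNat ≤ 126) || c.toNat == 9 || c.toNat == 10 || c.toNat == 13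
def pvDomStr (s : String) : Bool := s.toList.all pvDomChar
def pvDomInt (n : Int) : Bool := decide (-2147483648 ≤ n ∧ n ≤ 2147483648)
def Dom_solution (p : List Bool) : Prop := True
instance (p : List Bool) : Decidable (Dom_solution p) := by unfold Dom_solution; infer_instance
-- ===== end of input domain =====

-- B replaces A's per-cell range-sums, blank/seq/zeros state machine and second re-scan loop
-- with the closed form n*(n+1)//2 and one pass subtracting run*(run+1)//2 per False run (objective: simpler).


-- ===== PORT A =====
-- loop body of A's scan over p[i] (state: blank, seq, zeros)
def solA_step (st : Bool × Int × List Int) (x : Bool) : Bool × Int × List Int :=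
  if !x then
    if st.1 then (st.1, st.2.1 + 1, st.2.2)
    else (true, 1, st.2.2)
  else (false, 0, st.2.2 ++ [st.2.1])

def solution (p : List Bool) : Int :=
  let n : Int := p.length
  let total_square : Int := ((PySem.List.pyRange 0 (n + 1) 1).map (fun i => n - i)).sum
  let st := (PySem.List.pyRange 0 n 1).foldl
      (fun st i => solA_step st (PySem.List.pyGetD p i false)) (false, 0, ([] : List Int))
  let zeros := st.2.2 ++ [st.2.1]
  let total := zeros.foldl
      (fun t x => t - ((PySem.List.pyRange 0 x 1).map (fun i => x - i)).sum) total_square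
  if total ≥ 1000000000 then 1000000000 else total

-- ===== PORT B =====
-- loop body of B's single pass (state: total, run)
def solB_step (s : Int × Int) (x : Bool) : Int × Int :=
  if x then (s.1 - PySem.Int.floordiv (s.2 * (s.2 + 1)) 2, 0) else (s.1, s.2 + 1)

def solution_alt (p : List Bool) : Int :=
  let n : Int := p.length
  let t0 : Int := PySem.Int.floordiv (n * (n + 1)) 2
  let st := p.foldl solB_step (t0, 0)
  let total := st.1 - PySem.Int.floordiv (st.2 * (st.2 + 1)) 2
  if total ≥ 1000000000 then 1000000000 else total

-- ===== PRECONDITION & SPEC =====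
def Spec_solution (p : List Bool) (out : Int) : Prop := out = solution_alt p
instance (p : List Bool) (out : Int) : Decidable (Spec_solution p out) := by unfold Spec_solution; infer_instance

-- ===== CLAIM (what is proved, stated in full; the proofs are below) =====
def Claim_equal_solution : Prop := ∀ (p : List Bool), Dom_solution p → Spec_solution p (solution p)

-- ===== LEMMAS AND PROOFS =====

-- A's inner subtraction term: sum([x-i for i in range(0, x)])
def subA (x : Int) : Int := ((PySem.List.pyRange 0 x 1).map (fun i => x - i)).sum

lemma foldl_sub (zs : List Int) (t : Int) :
    zs.foldl (fun t x => t - ((PySem.List.pyRange 0 x 1).map (fun i => x - i)).sum) t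
      = t - (zs.map subA).sum := by
  induction zs generalizing t with
  | nil => simp
  | cons z zs ih => simp only [List.foldl_cons]; rw [ih]; simp [subA]; ring

lemma gauss (x : Int) (hx : 0 ≤ x) :
    (PySem.List.pyRange 1 (x + 1) 1).sum = PySem.Int.floordiv (x * (x + 1)) 2 := by
  induction x, hx using Int.le_induction with
  | base =>
      rw [PySem.List.pyRange_one_eq_nil (by omega)]
      rw [PySem.Int.floordiv_eq_ediv_of_pos (by norm_num)]
      norm_num
  | succ x hx ih =>
      rw [PySem.List.pyRange_one_succ_right (by omega), List.sum_append, ih]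
      rw [PySem.Int.floordiv_eq_ediv_of_pos (by norm_num),
          PySem.Int.floordiv_eq_ediv_of_pos (by norm_num)]
      have h2 : (x + 1) * (x + 1 + 1) = x * (x + 1) + (x + 1) * 2 := by ring
      rw [h2, Int.add_mul_ediv_right _ _ (by norm_num : (2:Int) ≠ 0)]
      simp

lemma subA_eq_tri (x : Int) (hx : 0 ≤ x) :
    subA x = PySem.Int.floordiv (x * (x + 1)) 2 := by
  have h1 : (PySem.List.pyRange 0 x 1).map (fun i => x - i) = PySem.List.pyRange x 0 (-1) := by
    rw [PySem.List.pyRange_one, PySem.List.pyRange_neg_one, List.map_map]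
    simp
  rw [subA, h1, PySem.List.pyRange_neg_one_eq_reverse, List.sum_reverse]
  simpa using gauss x hx

lemma main_loop (xs : List Bool) (blank : Bool) (seq : Int) (zeros : List Int) (t : Int)
    (hseq : 0 ≤ seq) (hb : blank = false → seq = 0) :
    (t - (((xs.foldl solA_step (blank, seq, zeros)).2.2.map subA).sum)
       - subA (xs.foldl solA_step (blank, seq, zeros)).2.1)
    = ((xs.foldl solB_step (t - (zeros.map subA).sum, seq)).1
       - PySem.Int.floordiv ((xs.foldl solB_step (t - (zeros.map subA).sum, seq)).2
           * ((xs.foldl solB_step (t - (zeros.map subA).sum, seq)).2 + 1)) 2) := by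
  induction xs generalizing blank seq zeros t with
  | nil =>
      simp only [List.foldl_nil]
      rw [subA_eq_tri seq hseq]
  | cons x xs ih =>
      cases x with
      | true =>
          simp only [List.foldl_cons, solA_step, solB_step, Bool.not_true, if_true]
          have := ih false 0 (zeros ++ [seq]) t le_rfl (fun _ => rfl)
          have hinit : t - ((zeros ++ [seq]).map subA).sum
              = (t - (zeros.map subA).sum) - PySem.Int.floordiv (seq * (seq + 1)) 2 := by
            rw [List.map_append, List.sum_append]
            simp [subA_eq_tri seq hseq]
            ring
          rw [hinit] at this
          exact this
      | false =>
          simp only [List.foldl_cons, solA_step, solB_step, Bool.not_false, reduceIte]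
          cases blank with
          | true =>
              simpa using ih true (seq + 1) zeros t (by omega) (by simp)
          | false =>
              have h0 : seq = 0 := hb rfl
              subst h0
              simpa using ih true 1 zeros t (by omega) (by simp)

lemma total_closed (p : List Bool) :
    ((PySem.List.pyRange 0 ((p.length : Int) + 1) 1).map (fun i => (p.length : Int) - i)).sum
      = PySem.Int.floordiv ((p.length : Int) * ((p.length : Int) + 1)) 2 := by
  rw [PySem.List.pyRange_one_succ_right (by positivity), List.map_append, List.sum_append]
  have : ((PySem.List.pyRange 0 (p.length : Int) 1).map (fun i => (p.length : Int) - i)).sum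
      = subA (p.length : Int) := rfl
  simp [this, subA_eq_tri (p.length : Int) (by positivity)]

-- ===== VERDICT (by name: the statement is the Claim_ definition above) =====
theorem solution_spec : Claim_equal_solution := by
  intro p _
  unfold Spec_solution solution solution_alt
  simp only []
  rw [PySem.List.foldl_pyRange_zero_pyGetD' p false solA_step (false, 0, ([] : List Int))]
  rw [foldl_sub, total_closed p]
  have h := main_loop p false 0 [] (PySem.Int.floordiv ((p.length : Int) * ((p.length : Int) + 1)) 2) le_rfl (fun _ => rfl)
  simp only [List.map_nil, List.sum_nil, sub_zero] at h
  rw [List.map_append, List.sum_append]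
  simp only [List.map_cons, List.map_nil, List.sum_cons, List.sum_nil, add_zero]
  rw [show ∀ a b c : Int, a - (b + c) = a - b - c from fun a b c => by ring]
  rw [h]
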